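-- pv_equiv track=rewrite | github.com/gaboza12/we-are-algorithm | 724thomas/Week11 Graph Traversal/7576.py | solution
-- ===== SOURCE A (Python) =====
-- from collections import deque
--
-- def solution(m, n, arr):
--     queue = deque()
--     for row in range(n):
--         for col in range(m):
--             if arr[row][col] == 1:
--                 queue.append((row, col))
--
--     dir = [[0, 1], [0, -1], [1, 0], [-1, 0]]
--
--     while queue:
--         x, y = queue.popleft()
--         next_val = arr[x][y] + 1
--
--         for x2, y2 in dir:
--             nx, ny = x + x2, y + y2
--             if not (0 <= nx < n and 0 <= ny < m) or arr[nx][ny] != 0: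
--                 continue
--             arr[nx][ny] = next_val
--             queue.append((nx, ny))
--
--     ans = 0
--     for row in range(n):
--         for col in range(m):
--             if arr[row][col] == 0:
--                 return -1
--             ans = max(ans, arr[row][col]-1)
--
--     return ans
-- ===== SOURCE B (Python) =====
-- def solution(m, n, arr):
--     # round-based frontier expansion with a day counter (no deque, no per-cell value reads)
--     frontier = [(r, c) for r in range(n) for c in range(m) if arr[r][c] == 1]
--     day = 1
--     while frontier:
--         nxt = []
--         for r, c in frontier:
--             for dr, dc in ((0, 1), (0, -1), (1, 0), (-1, 0)):
--                 nr, nc = r + dr, c + dc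
--                 if 0 <= nr < n and 0 <= nc < m and arr[nr][nc] == 0:
--                     arr[nr][nc] = day + 1
--                     nxt.append((nr, nc))
--         frontier = nxt
--         day += 1
--     vals = [arr[r][c] for r in range(n) for c in range(m)]
--     if 0 in vals:
--         return -1
--     return max([0] + [v - 1 for v in vals])
-- ===== Notes on version B (the rewrite author's own statement) =====
-- stated objective: alternative
-- what changed: A runs a FIFO deque BFS where each popped cell re-reads its stored grid value to compute the neighbour value; B discards the queue and expands whole frontiers round by round with a day counter, writing day+1 each round, and replaces A's early-return double scan by a membership test plus a max fold over the flattened block.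
import Mathlib
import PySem

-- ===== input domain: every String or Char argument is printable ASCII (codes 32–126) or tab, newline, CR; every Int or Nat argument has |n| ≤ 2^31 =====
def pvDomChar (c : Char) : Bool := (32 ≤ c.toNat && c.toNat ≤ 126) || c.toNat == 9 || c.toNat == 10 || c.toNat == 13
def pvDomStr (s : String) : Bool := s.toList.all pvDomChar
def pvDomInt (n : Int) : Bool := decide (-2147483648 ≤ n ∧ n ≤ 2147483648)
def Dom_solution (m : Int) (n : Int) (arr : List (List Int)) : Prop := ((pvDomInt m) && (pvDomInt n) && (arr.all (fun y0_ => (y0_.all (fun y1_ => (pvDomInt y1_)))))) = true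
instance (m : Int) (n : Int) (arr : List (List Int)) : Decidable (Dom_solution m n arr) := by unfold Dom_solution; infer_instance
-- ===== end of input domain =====

-- B replaces A's FIFO deque (reading each popped cell's stored value) by round-based frontier
-- expansion with a day counter; both Pythons mutate arr in place and end with the same grid,
-- the equivalence proved here is about the return value.

-- ===== PORT A =====
-- shared grid access helpers: arr[i][j] reads / writes (exact for the 0 ≤ index accesses
-- both programs make; out-of-physical-range reads are excluded by Pre_solution)
def get2 (arr : List (List Int)) (i j : Int) : Int :=
  PySem.List.pyGetD (PySem.List.pyGetD arr i []) j 0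

def set2 (arr : List (List Int)) (i j v : Int) : List (List Int) :=
  PySem.List.pySetD arr i (PySem.List.pySetD (PySem.List.pyGetD arr i []) j v)

-- both Pythons collect the cells equal to 1 by the same row-major scan
def ripeCells (m n : Int) (arr : List (List Int)) : List (Int × Int) :=
  (PySem.List.pyRange 0 n 1).flatMap (fun r =>
    (PySem.List.pyRange 0 m 1).filterMap (fun c =>
      if get2 arr r c == 1 then some (r, c) else none))

-- Python's dir = [[0,1],[0,-1],[1,0],[-1,0]] (2-lists ported as pairs)
def dirA : List (Int × Int) := [(0, 1), (0, -1), (1, 0), (-1, 0)]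

-- one direction of the inner `for x2, y2 in dir` loop, identical in both Pythons
-- ('if not (...) or arr[nx][ny] != 0: continue' rendered as the equivalent positive guard)
def stepG (m n nv : Int) (c : Int × Int) (s : List (List Int) × List (Int × Int))
    (d : Int × Int) : List (List Int) × List (Int × Int) :=
  let nx := c.1 + d.1
  let ny := c.2 + d.2
  if 0 ≤ nx ∧ nx < n ∧ 0 ≤ ny ∧ ny < m ∧ get2 s.1 nx ny = 0 then
    (set2 s.1 nx ny nv, s.2 ++ [(nx, ny)])
  else s

-- the whole inner loop: write nv into each in-bounds zero neighbour of c, appending it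
def grow (m n nv : Int) (st : List (List Int) × List (Int × Int)) (c : Int × Int) :
    List (List Int) × List (Int × Int) :=
  dirA.foldl (stepG m n nv c) st

-- number of zero cells, used only as provably sufficient fuel for the while loops
def Z (arr : List (List Int)) : Nat := (arr.map (fun r => r.count 0)).sum

-- A's while loop: pop the head, read its stored value, push discovered cells onto the queue
def bfsA : Nat → Int → Int → List (List Int) → List (Int × Int) → List (List Int)
  | 0, _, _, arr, _ => arr
  | _ + 1, _, _, arr, [] => arr
  | fuel + 1, m, n, arr, c :: q =>
      let st := grow m n (get2 arr c.1 c.2 + 1) (arr, q) c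
      bfsA fuel m n st.1 st.2

-- the final double scan, with A's early `return -1`
def cellVals (m n : Int) (arr : List (List Int)) : List Int :=
  (PySem.List.pyRange 0 n 1).flatMap (fun r =>
    (PySem.List.pyRange 0 m 1).map (fun c => get2 arr r c))

def scanA : List Int → Int → Int
  | [], ans => ans
  | v :: rest, ans => if v == 0 then -1 else scanA rest (max ans (v - 1))

def solution (m : Int) (n : Int) (arr : List (List Int)) : Int :=
  let queue := ripeCells m n arr
  let arr2 := bfsA (Z arr + queue.length) m n arr queue
  scanA (cellVals m n arr2) 0

-- ===== PORT B =====
-- B's while loop: expand the whole frontier in one round, writing day + 1, then advance day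
def bfsB : Nat → Int → Int → List (List Int) → List (Int × Int) → Int → List (List Int)
  | 0, _, _, arr, _, _ => arr
  | _ + 1, _, _, arr, [], _ => arr
  | fuel + 1, m, n, arr, f, day =>
      let st := f.foldl (fun s c => grow m n (day + 1) s c) (arr, ([] : List (Int × Int)))
      bfsB fuel m n st.1 st.2 (day + 1)

def solution_alt (m : Int) (n : Int) (arr : List (List Int)) : Int :=
  let frontier := ripeCells m n arr
  let arr2 := bfsB (Z arr + 1) m n arr frontier 1
  let vals := cellVals m n arr2
  if vals.contains 0 then -1
  else (vals.map (fun v => v - 1)).foldl max 0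

-- ===== PRECONDITION & SPEC =====
-- Pre_ excludes exactly the inputs where A raises IndexError: when both dimensions are
-- positive, arr must physically contain the n×m block the scans index.
def Pre_solution (m : Int) (n : Int) (arr : List (List Int)) : Prop :=
  1 ≤ m → 1 ≤ n → (n ≤ (arr.length : Int) ∧ ∀ i < n.toNat, m ≤ ((arr.getD i []).length : Int))

instance (m : Int) (n : Int) (arr : List (List Int)) : Decidable (Pre_solution m n arr) := by
  unfold Pre_solution; infer_instance

def pvWitness_solution : Int × Int × List (List Int) := (2, 2, [[1, 0], [0, -1]])

def Spec_solution (m : Int) (n : Int) (arr : List (List Int)) (out : Int) : Prop := out = solution_alt m n arr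
instance (m : Int) (n : Int) (arr : List (List Int)) (out : Int) : Decidable (Spec_solution m n arr out) := by unfold Spec_solution; infer_instance

-- ===== CLAIM (what is proved, stated in full; the proofs are below) =====
def Claim_equal_solution : Prop := ∀ (m : Int) (n : Int) (arr : List (List Int)), Dom_solution m n arr → Pre_solution m n arr → Spec_solution m n arr (solution m n arr)

-- ===== LEMMAS AND PROOFS =====

-- abbreviations used only by the proofs
def InB (m n : Int) (c : Int × Int) : Prop :=
  0 ≤ c.1 ∧ c.1 < n ∧ 0 ≤ c.2 ∧ c.2 < m

def GOK (m n : Int) (arr : List (List Int)) : Prop :=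
  n ≤ (arr.length : Int) ∧ ∀ i < n.toNat, m ≤ ((arr.getD i []).length : Int)

def NZpres (a b : List (List Int)) : Prop :=
  ∀ i j : Int, 0 ≤ i → 0 ≤ j → get2 a i j ≠ 0 → get2 b i j = get2 a i j

def CellsP (m n : Int) (arr : List (List Int)) (v : Int) (f : List (Int × Int)) : Prop :=
  ∀ c ∈ f, InB m n c ∧ get2 arr c.1 c.2 = v

-- b extends a by writing nv into the (previously zero, in-bounds) cells δ
def GExt (m n nv : Int) (a b : List (List Int)) (δ : List (Int × Int)) : Prop :=
  GOK m n b ∧ Z b + δ.length = Z a ∧ CellsP m n b nv δ ∧ (δ = [] → b = a) ∧ NZpres a b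

-- A-side one-pop fold over the remaining queue, and B-side one-round fold
def procA (m n : Int) (st : List (List Int) × List (Int × Int)) (f : List (Int × Int)) :
    List (List Int) × List (Int × Int) :=
  f.foldl (fun st c => grow m n (get2 st.1 c.1 c.2 + 1) st c) st

def procB (m n day : Int) (st : List (List Int) × List (Int × Int)) (f : List (Int × Int)) :
    List (List Int) × List (Int × Int) :=
  f.foldl (fun s c => grow m n (day + 1) s c) st

theorem pyGetD_nn {α : Type} (xs : List α) (i : Int) (d : α) (h : 0 ≤ i) :
    PySem.List.pyGetD xs i d = xs.getD i.toNat d := by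
  rw [← Int.toNat_of_nonneg h, PySem.List.pyGetD_natCast, Int.toNat_of_nonneg h]

theorem get2_nn (arr : List (List Int)) (i j : Int) (hi : 0 ≤ i) (hj : 0 ≤ j) :
    get2 arr i j = (arr.getD i.toNat []).getD j.toNat 0 := by
  unfold get2; rw [pyGetD_nn _ _ _ hi, pyGetD_nn _ _ _ hj]

theorem set2_nn (arr : List (List Int)) (i j v : Int) (hi : 0 ≤ i) (hj : 0 ≤ j) :
    set2 arr i j v = arr.set i.toNat ((arr.getD i.toNat []).set j.toNat v) := by
  unfold set2
  rw [pyGetD_nn _ _ _ hi, PySem.List.pySetD_of_nonneg _ _ hj,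
    PySem.List.pySetD_of_nonneg _ _ hi]

theorem getD_set_self {α : Type} (xs : List α) (k : Nat) (v d : α) (h : k < xs.length) :
    (xs.set k v).getD k d = v := by
  simp [List.getD_eq_getElem?_getD, h]

theorem getD_set_ne {α : Type} (xs : List α) (k i : Nat) (v d : α) (h : i ≠ k) :
    (xs.set k v).getD i d = xs.getD i d := by
  simp [List.getD_eq_getElem?_getD, Ne.symm h]

theorem count_set_zero (l : List Int) (k : Nat) (v : Int) (h : k < l.length)
    (h0 : l.getD k 0 = 0) (hv : v ≠ 0) : (l.set k v).count 0 + 1 = l.count 0 := by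
  rw [List.count_set h]
  rw [List.getD_eq_getElem _ _ h] at h0
  simp only [h0, beq_self_eq_true, if_true, beq_iff_eq, if_neg hv]
  have : 1 ≤ l.count 0 := List.count_pos_iff.mpr (by rw [← h0]; exact List.getElem_mem h)
  omega

theorem Z_set (arr : List (List Int)) (k : Nat) (row' : List Int) (hk : k < arr.length)
    (h : row'.count 0 + 1 = (arr.getD k []).count 0) :
    Z (arr.set k row') + 1 = Z arr := by
  induction arr generalizing k with
  | nil => simp at hk
  | cons r t ih =>
    cases k with
    | zero =>
      simp only [List.getD_cons_zero] at h
      simp only [Z, List.set, List.map_cons, List.sum_cons]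
      omega
    | succ k =>
      simp only [List.getD_cons_succ] at h
      have := ih k (by simpa using hk) h
      simp only [Z, List.set, List.map_cons, List.sum_cons] at *
      omega

theorem GExt_refl (m n nv : Int) (a : List (List Int)) (hg : GOK m n a) :
    GExt m n nv a a [] :=
  ⟨hg, by simp, by simp [CellsP], fun _ => rfl, fun _ _ _ _ _ => rfl⟩

theorem GExt_trans (m n nv : Int) (hnv : nv ≠ 0) (a b c : List (List Int))
    (δ₁ δ₂ : List (Int × Int)) (h1 : GExt m n nv a b δ₁) (h2 : GExt m n nv b c δ₂) :
    GExt m n nv a c (δ₁ ++ δ₂) := by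
  obtain ⟨g1, z1, c1, e1, p1⟩ := h1
  obtain ⟨g2, z2, c2, e2, p2⟩ := h2
  refine ⟨g2, by simp only [List.length_append]; omega, ?_, ?_, ?_⟩
  · intro x hx
    rcases List.mem_append.mp hx with hx | hx
    · obtain ⟨hin, hv⟩ := c1 x hx
      exact ⟨hin, by rw [p2 x.1 x.2 hin.1 hin.2.2.1 (hv ▸ hnv), hv]⟩
    · exact c2 x hx
  · intro hemp
    rw [List.append_eq_nil_iff] at hemp
    rw [e2 hemp.2, e1 hemp.1]
  · intro i j hi hj hz
    rw [p2 i j hi hj (by rw [p1 i j hi hj hz]; exact hz), p1 i j hi hj hz]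

-- a single in-bounds write of nv ≠ 0 onto a zero cell is a GExt by that one cell
theorem write_ext0 (m n nv : Int) (hnv : nv ≠ 0) (a : List (List Int)) (nx ny : Int)
    (hg : GOK m n a) (hx0 : 0 ≤ nx) (hxn : nx < n) (hy0 : 0 ≤ ny) (hym : ny < m)
    (hv0 : get2 a nx ny = 0) :
    GExt m n nv a (set2 a nx ny nv) [(nx, ny)] := by
  obtain ⟨hlen, hrow⟩ := hg
  have hxl : nx.toNat < a.length := by omega
  have hxn' : nx.toNat < n.toNat := by omega
  have hrl : m ≤ (((a.getD nx.toNat []).length : Nat) : Int) := hrow nx.toNat hxn'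
  have hyl : ny.toNat < (a.getD nx.toNat []).length := by omega
  have hb : set2 a nx ny nv = a.set nx.toNat ((a.getD nx.toNat []).set ny.toNat nv) :=
    set2_nn a nx ny nv hx0 hy0
  have hv0' : (a.getD nx.toNat []).getD ny.toNat 0 = 0 := by
    rw [← get2_nn a nx ny hx0 hy0]; exact hv0
  rw [hb]
  refine ⟨⟨by simpa using hlen, ?_⟩, ?_, ?_, by simp, ?_⟩
  · intro i hi
    by_cases hik : i = nx.toNat
    · subst hik
      rw [getD_set_self _ _ _ _ hxl]
      simpa using hrow nx.toNat hi
    · rw [getD_set_ne _ _ _ _ _ hik]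
      exact hrow i hi
  · have := Z_set a nx.toNat ((a.getD nx.toNat []).set ny.toNat nv) hxl
      (count_set_zero _ _ _ hyl hv0' hnv)
    simpa using this
  · intro x hx
    simp only [List.mem_singleton] at hx
    subst hx
    refine ⟨⟨hx0, hxn, hy0, hym⟩, ?_⟩
    rw [get2_nn _ _ _ hx0 hy0, getD_set_self _ _ _ _ hxl, getD_set_self _ _ _ _ hyl]
  · intro i j hi hj hz
    rw [get2_nn _ _ _ hi hj] at hz ⊢
    rw [get2_nn _ _ _ hi hj]
    by_cases hik : i.toNat = nx.toNat
    · have hieq : i = nx := by omega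
      rw [hik, getD_set_self _ _ _ _ hxl]
      by_cases hjl : j.toNat = ny.toNat
      · exfalso
        have hjeq : j = ny := by omega
        rw [hieq, hjeq] at hz
        rw [get2_nn _ _ _ hx0 hy0] at hv0
        exact hz hv0
      · rw [getD_set_ne _ _ _ _ _ hjl]
    · rw [getD_set_ne _ _ _ _ _ hik]

-- the inner loop over any direction list is a GExt, appending the written cells
theorem foldl_stepG_ext (m n nv : Int) (hnv : nv ≠ 0) (c : Int × Int) :
    ∀ (ds : List (Int × Int)) (a : List (List Int)) (q : List (Int × Int)), GOK m n a →
    ∃ b δ, ds.foldl (stepG m n nv c) (a, q) = (b, q ++ δ) ∧ GExt m n nv a b δ := by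
  intro ds
  induction ds with
  | nil => exact fun a q hg => ⟨a, [], by simp, GExt_refl m n nv a hg⟩
  | cons d ds ih =>
    intro a q hg
    simp only [List.foldl_cons]
    by_cases hgd : 0 ≤ c.1 + d.1 ∧ c.1 + d.1 < n ∧ 0 ≤ c.2 + d.2 ∧ c.2 + d.2 < m ∧
        get2 a (c.1 + d.1) (c.2 + d.2) = 0
    · have hstep : stepG m n nv c (a, q) d =
          (set2 a (c.1 + d.1) (c.2 + d.2) nv, q ++ [(c.1 + d.1, c.2 + d.2)]) := by
        simp only [stepG, if_pos hgd]
      rw [hstep]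
      obtain ⟨hx0, hxn, hy0, hym, hv0⟩ := hgd
      have hw := write_ext0 m n nv hnv a _ _ hg hx0 hxn hy0 hym hv0
      obtain ⟨b, δ, heq, hext⟩ := ih (set2 a (c.1 + d.1) (c.2 + d.2) nv)
        (q ++ [(c.1 + d.1, c.2 + d.2)]) hw.1
      exact ⟨b, (c.1 + d.1, c.2 + d.2) :: δ,
        by rw [heq]; simp,
        by simpa using GExt_trans m n nv hnv _ _ _ _ _ hw hext⟩
    · have hstep : stepG m n nv c (a, q) d = (a, q) := by
        simp only [stepG, if_neg hgd]
      rw [hstep]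
      exact ih a q hg

theorem grow_ext (m n nv : Int) (hnv : nv ≠ 0) (a : List (List Int))
    (q : List (Int × Int)) (c : Int × Int) (hg : GOK m n a) :
    ∃ b δ, grow m n nv (a, q) c = (b, q ++ δ) ∧ GExt m n nv a b δ :=
  foldl_stepG_ext m n nv hnv c dirA a q hg

-- the accumulator of the inner loop is only appended to
theorem foldl_stepG_shift (m n nv : Int) (c : Int × Int) :
    ∀ (ds : List (Int × Int)) (a : List (List Int)) (q : List (Int × Int)),
    ds.foldl (stepG m n nv c) (a, q) =
      ((ds.foldl (stepG m n nv c) (a, [])).1, q ++ (ds.foldl (stepG m n nv c) (a, [])).2) := by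
  intro ds
  induction ds with
  | nil => simp
  | cons d ds ih =>
    intro a q
    simp only [List.foldl_cons]
    by_cases hgd : 0 ≤ c.1 + d.1 ∧ c.1 + d.1 < n ∧ 0 ≤ c.2 + d.2 ∧ c.2 + d.2 < m ∧
        get2 a (c.1 + d.1) (c.2 + d.2) = 0
    · simp only [stepG, if_pos hgd]
      rw [ih _ (q ++ [(c.1 + d.1, c.2 + d.2)]), ih _ ([] ++ [(c.1 + d.1, c.2 + d.2)])]
      simp
    · simp only [stepG, if_neg hgd]
      exact ih a q

theorem grow_shift (m n nv : Int) (a : List (List Int)) (q : List (Int × Int))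
    (c : Int × Int) :
    grow m n nv (a, q) c = ((grow m n nv (a, []) c).1, q ++ (grow m n nv (a, []) c).2) :=
  foldl_stepG_shift m n nv c dirA a q

theorem bfsA_nil (fuel : Nat) (m n : Int) (arr : List (List Int)) :
    bfsA fuel m n arr [] = arr := by cases fuel <;> rfl

theorem bfsB_nil (fuel : Nat) (m n : Int) (arr : List (List Int)) (day : Int) :
    bfsB fuel m n arr [] day = arr := by cases fuel <;> rfl

-- A's queue loop processes a prefix f exactly as the fold procA does
theorem bfsA_run (m n : Int) :
    ∀ (f p : List (Int × Int)) (rest : Nat) (a : List (List Int)),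
    bfsA (f.length + rest) m n a (f ++ p) =
      bfsA rest m n (procA m n (a, p) f).1 (procA m n (a, p) f).2 := by
  intro f
  induction f with
  | nil => intro p rest a; simp [procA]
  | cons c f ih =>
    intro p rest a
    have hlen : (c :: f).length + rest = (f.length + rest) + 1 := by
      simp [Nat.succ_add]
    rw [hlen]
    show bfsA (f.length + rest) m n (grow m n (get2 a c.1 c.2 + 1) (a, f ++ p) c).1
        (grow m n (get2 a c.1 c.2 + 1) (a, f ++ p) c).2 = _
    rw [grow_shift]
    have hre : (f ++ p) ++ (grow m n (get2 a c.1 c.2 + 1) (a, []) c).2 =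
        f ++ (p ++ (grow m n (get2 a c.1 c.2 + 1) (a, []) c).2) := by
      simp
    rw [hre, ih]
    have hpr : procA m n (a, p) (c :: f) =
        procA m n ((grow m n (get2 a c.1 c.2 + 1) (a, []) c).1,
          p ++ (grow m n (get2 a c.1 c.2 + 1) (a, []) c).2) f := by
      simp only [procA, List.foldl_cons]
      rw [grow_shift m n _ a p c]
    rw [hpr]

-- under the day invariant, A's fold and B's fold coincide
theorem proc_eq (m n day : Int) (hd : 1 ≤ day) :
    ∀ (f : List (Int × Int)) (a : List (List Int)) (q : List (Int × Int)),
    GOK m n a → CellsP m n a day f →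
    procA m n (a, q) f = procB m n day (a, q) f := by
  intro f
  induction f with
  | nil => intro a q _ _; rfl
  | cons c f ih =>
    intro a q hg hc
    obtain ⟨hin, hv⟩ := hc c List.mem_cons_self
    have hstep : grow m n (get2 a c.1 c.2 + 1) (a, q) c = grow m n (day + 1) (a, q) c := by
      rw [hv]
    simp only [procA, procB, List.foldl_cons]
    rw [hstep]
    obtain ⟨b, δ, heq, hext⟩ := grow_ext m n (day + 1) (by omega) a q c hg
    rw [heq]
    have hrest : CellsP m n b day f := by
      intro x hx
      obtain ⟨hxin, hxv⟩ := hc x (List.mem_cons_of_mem _ hx)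
      exact ⟨hxin, by rw [hext.2.2.2.2 x.1 x.2 hxin.1 hxin.2.2.1 (by rw [hxv]; omega), hxv]⟩
    exact ih b (q ++ δ) hext.1 hrest

-- B's one-round fold is a GExt
theorem procB_ext (m n day : Int) (hd : 1 ≤ day) :
    ∀ (f : List (Int × Int)) (a : List (List Int)) (q : List (Int × Int)), GOK m n a →
    ∃ b δ, procB m n day (a, q) f = (b, q ++ δ) ∧ GExt m n (day + 1) a b δ := by
  intro f
  induction f with
  | nil => exact fun a q hg => ⟨a, [], by simp [procB], GExt_refl m n (day + 1) a hg⟩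
  | cons c f ih =>
    intro a q hg
    simp only [procB, List.foldl_cons]
    obtain ⟨b₁, δ₁, heq1, hext1⟩ := grow_ext m n (day + 1) (by omega) a q c hg
    rw [heq1]
    obtain ⟨b, δ₂, heq2, hext2⟩ := ih b₁ (q ++ δ₁) hext1.1
    simp only [procB] at heq2
    refine ⟨b, δ₁ ++ δ₂, by rw [heq2]; simp, GExt_trans m n (day + 1) (by omega) _ _ _ _ _ hext1 hext2⟩

-- the central equivalence: with sufficient fuel, A's queue BFS equals B's round BFS
theorem bfs_eq (m n : Int) :
    ∀ (k : Nat) (arr : List (List Int)) (f : List (Int × Int)) (day : Int) (fA fB : Nat),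
    Z arr ≤ k → GOK m n arr → 1 ≤ day → CellsP m n arr day f →
    f.length + Z arr ≤ fA → Z arr + 1 ≤ fB →
    bfsA fA m n arr f = bfsB fB m n arr f day := by
  intro k
  induction k with
  | zero =>
    intro arr f day fA fB hk hg hd hc hfa hfb
    cases f with
    | nil => rw [bfsA_nil, bfsB_nil]
    | cons c f =>
      obtain ⟨fB', rfl⟩ : ∃ fB', fB = fB' + 1 := ⟨fB - 1, by omega⟩
      obtain ⟨rest, hrest⟩ : ∃ rest, fA = (c :: f).length + rest ∧ Z arr ≤ rest :=
        ⟨fA - (c :: f).length, by omega, by omega⟩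
      have hrun := bfsA_run m n (c :: f) [] rest arr
      rw [List.append_nil] at hrun
      rw [hrest.1, hrun]
      rw [proc_eq m n day hd (c :: f) arr [] hg hc]
      obtain ⟨b, δ, heq, hext⟩ := procB_ext m n day hd (c :: f) arr [] hg
      rw [heq]
      have hδ : δ = [] := by
        have h1 := hext.2.1
        have h2 : δ.length = 0 := by omega
        exact List.eq_nil_of_length_eq_zero h2
      subst hδ
      have hb : b = arr := hext.2.2.2.1 rfl
      rw [hb] at heq ⊢
      show bfsA rest m n arr [] = bfsB (fB' + 1) m n arr (c :: f) day
      rw [bfsA_nil]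
      show arr = bfsB fB' m n (procB m n day (arr, []) (c :: f)).1
        (procB m n day (arr, []) (c :: f)).2 (day + 1)
      rw [heq]
      show arr = bfsB fB' m n arr [] (day + 1)
      rw [bfsB_nil]
  | succ k ih =>
    intro arr f day fA fB hk hg hd hc hfa hfb
    cases f with
    | nil => rw [bfsA_nil, bfsB_nil]
    | cons c f =>
      obtain ⟨fB', rfl⟩ : ∃ fB', fB = fB' + 1 := ⟨fB - 1, by omega⟩
      obtain ⟨rest, hrest⟩ : ∃ rest, fA = (c :: f).length + rest ∧ Z arr ≤ rest :=
        ⟨fA - (c :: f).length, by omega, by omega⟩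
      have hrun := bfsA_run m n (c :: f) [] rest arr
      rw [List.append_nil] at hrun
      rw [hrest.1, hrun]
      rw [proc_eq m n day hd (c :: f) arr [] hg hc]
      obtain ⟨b, δ, heq, hext⟩ := procB_ext m n day hd (c :: f) arr [] hg
      rw [heq]
      have hB : bfsB (fB' + 1) m n arr (c :: f) day = bfsB fB' m n b δ (day + 1) := by
        show bfsB fB' m n (procB m n day (arr, []) (c :: f)).1
          (procB m n day (arr, []) (c :: f)).2 (day + 1) = _
        rw [heq]
        rfl
      rw [hB]
      show bfsA rest m n b ([] ++ δ) = bfsB fB' m n b δ (day + 1)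
      rw [List.nil_append]
      cases hδ : δ with
      | nil =>
        subst hδ
        rw [hext.2.2.2.1 rfl, bfsA_nil, bfsB_nil]
      | cons d δ' =>
        have hzb : Z b + δ.length = Z arr := hext.2.1
        have hlen1 : 1 ≤ δ.length := by rw [hδ]; simp
        rw [← hδ]
        exact ih b δ (day + 1) rest fB' (by omega) hext.1 (by omega)
          (by rw [hδ] at hext ⊢; exact hext.2.2.1) (by omega) (by omega)

-- the initial scan collects exactly in-bounds cells of value 1
theorem ripe_prop (m n : Int) (arr : List (List Int)) :
    CellsP m n arr 1 (ripeCells m n arr) := by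
  intro c hc
  unfold ripeCells at hc
  rw [List.mem_flatMap] at hc
  obtain ⟨r, hr, hc⟩ := hc
  rw [List.mem_filterMap] at hc
  obtain ⟨col, hcol, hsome⟩ := hc
  rw [PySem.List.mem_pyRange_one] at hr hcol
  by_cases h1 : get2 arr r col == 1
  · rw [if_pos h1] at hsome
    cases hsome
    exact ⟨⟨by omega, by omega, by omega, by omega⟩, by simpa using h1⟩
  · rw [if_neg h1] at hsome
    cases hsome

theorem ripe_nil (m n : Int) (arr : List (List Int)) (h : ¬(1 ≤ m ∧ 1 ≤ n)) :
    ripeCells m n arr = [] := by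
  unfold ripeCells
  by_cases hn : 1 ≤ n
  · have hm : ¬ 1 ≤ m := fun hm => h ⟨hm, hn⟩
    have : PySem.List.pyRange 0 m 1 = [] := PySem.List.pyRange_one_eq_nil (by omega)
    simp [this]
  · have : PySem.List.pyRange 0 n 1 = [] := PySem.List.pyRange_one_eq_nil (by omega)
    simp [this]

-- A's early-return scan equals B's contains / max formulation
theorem scanA_eq (cells : List Int) :
    ∀ ans : Int, scanA cells ans =
      if cells.contains 0 then -1 else (cells.map (fun v => v - 1)).foldl max ans := by
  induction cells with
  | nil => intro ans; simp [scanA]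
  | cons v rest ih =>
    intro ans
    by_cases hv : v = 0
    · subst hv; simp [scanA]
    · have : (v == 0) = false := by simpa using hv
      simp only [scanA, this, if_false, Bool.false_eq_true, List.contains_cons,
        List.map_cons, List.foldl_cons]
      rw [ih (max ans (v - 1))]
      have h0 : ¬ (0 = v) := fun h => hv h.symm
      simp [h0]

-- ===== VERDICT (by name: the statement is the Claim_ definition above) =====
theorem solution_spec : Claim_equal_solution := by
  intro m n arr _ hpre
  simp only [Spec_solution, solution, solution_alt]
  by_cases hmn : 1 ≤ m ∧ 1 ≤ n
  · have hg : GOK m n arr := hpre hmn.1 hmn.2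
    have heq : bfsA (Z arr + (ripeCells m n arr).length) m n arr (ripeCells m n arr) =
        bfsB (Z arr + 1) m n arr (ripeCells m n arr) 1 :=
      bfs_eq m n (Z arr) arr (ripeCells m n arr) 1 _ _ le_rfl hg le_rfl
        (ripe_prop m n arr) (by omega) le_rfl
    rw [heq, scanA_eq]
  · rw [ripe_nil m n arr hmn]
    rw [bfsA_nil, bfsB_nil, scanA_eq]
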